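-- pv_equiv track=rewrite | github.com/konradswierczek/pyramidi | pyramidi/analysis.py | interval_vector
-- ===== SOURCE A (Python) =====
-- from itertools import combinations
--
-- def interval_vector(chord):
--         """ Returns Interval Vector of a chord after Forte 1973.
--             chord = list of MIDI or pitch class numbers representing a chord
--         """
--
--         combos = list(combinations(unique_pc(chord),2))
--         intervals = [abs(pitch[0]- pitch[1])%12 for pitch in combos]
--         for ind,interval in enumerate(intervals):
--                 if interval > 6:
--                         intervals[ind] = 12 - intervals[ind]
--         intervalvector = [0 for i in range(6)]
--         for interval in intervals:
--                 intervalvector[interval-1] = intervalvector[interval-1] + 1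
--         return intervalvector
--
-- def unique_pc(chord):
--         """ Returns tuple of unique pitch classes in a chord.
--             chord = list of MIDI or pitch class numbers representing a chord
--         """
--         return set([note%12 for note in chord])
-- ===== SOURCE B (Python) =====
-- def interval_vector(chord):
--     """ Returns Interval Vector of a chord after Forte 1973.
--         chord = list of MIDI or pitch class numbers representing a chord
--     """
--     present = [False] * 12
--     for note in chord:
--         present[note % 12] = True
--     counts = [sum(1 for pc in range(12) if present[pc] and present[(pc + ic) % 12])
--               for ic in range(1, 7)]
--     counts[5] //= 2
--     return counts
-- ===== Notes on version B (the rewrite author's own statement) =====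
-- stated objective: alternative
-- what changed: Replaces the combinations-over-unique-pitch-classes enumeration (quadratic in the number of distinct pitch classes, with an in-place fix-up pass folding intervals >6) by a fixed 12-slot pitch-class presence table scanned once per interval class 1..6, counting pc/(pc+ic)%12 co-presence and halving the tritone bucket.
import Mathlib
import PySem

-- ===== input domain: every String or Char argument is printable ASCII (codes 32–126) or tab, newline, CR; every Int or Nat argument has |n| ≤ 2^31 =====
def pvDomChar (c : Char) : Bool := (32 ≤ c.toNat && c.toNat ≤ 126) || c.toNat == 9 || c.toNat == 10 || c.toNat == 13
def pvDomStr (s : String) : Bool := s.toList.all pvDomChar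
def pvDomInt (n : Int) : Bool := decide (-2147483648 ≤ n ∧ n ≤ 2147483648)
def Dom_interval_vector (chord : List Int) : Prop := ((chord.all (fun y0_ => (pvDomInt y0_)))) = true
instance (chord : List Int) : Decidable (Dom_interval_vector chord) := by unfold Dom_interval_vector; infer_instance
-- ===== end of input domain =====

-- B replaces A's pairwise combinations enumeration by a 12-slot pitch-class presence
-- table scanned once per interval class (tritone bucket halved); objective: alternative
-- algorithm of similar cost (constant-bounded core either way).

-- ===== PORT A =====
-- itertools.combinations(it, 2) in iteration order of `it`
def pvCombos2 : List Int → List (Int × Int)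
  | [] => []
  | x :: xs => xs.map (fun y => (x, y)) ++ pvCombos2 xs

def interval_vector (chord : List Int) : List Int :=
  -- unique_pc(chord) = set([note % 12 for note in chord]); the final counts do not
  -- depend on the set's iteration order, so Set.ofList's first-occurrence order is exact here
  let u : PySem.Set Int := PySem.Set.ofList (chord.map (fun note => PySem.Int.mod note 12))
  let combos := pvCombos2 u
  let intervals := combos.map (fun pitch => PySem.Int.mod |pitch.1 - pitch.2| 12)
  -- for ind,interval in enumerate(intervals): if interval > 6: intervals[ind] = 12 - intervals[ind]
  -- (intervals[ind] = interval at that moment: each index is written at most once)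
  let intervals2 := (PySem.List.enumerate intervals 0).foldl
    (fun acc p => if p.2 > 6 then PySem.List.pySetD acc p.1 (12 - p.2) else acc) intervals
  let intervalvector := (List.range 6).map (fun _ => (0 : Int))
  -- intervalvector[interval-1] += 1 ; interval-1 is always in range 0..5 (proved below),
  -- so the total pySetD/pyGetD forms are exact
  intervals2.foldl (fun iv interval =>
    PySem.List.pySetD iv (interval - 1) (PySem.List.pyGetD iv (interval - 1) 0 + 1)) intervalvector

-- ===== PORT B =====
def interval_vector_alt (chord : List Int) : List Int :=
  -- present[note % 12] = True ; note % 12 is always in range 0..11, so pySetD is exact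
  let present : List Bool := chord.foldl
    (fun pr note => PySem.List.pySetD pr (PySem.Int.mod note 12) true) (List.replicate 12 false)
  let counts : List Int := (PySem.List.pyRange 1 7 1).map (fun ic =>
    (((PySem.List.pyRange 0 12 1).filter (fun pc =>
        PySem.List.pyGetD present pc false
          && PySem.List.pyGetD present (PySem.Int.mod (pc + ic) 12) false)).length : Int))
  PySem.List.pySetD counts 5 (PySem.Int.floordiv (PySem.List.pyGetD counts 5 0) 2)

-- ===== PRECONDITION & SPEC =====
def Spec_interval_vector (chord : List Int) (out : List Int) : Prop := out = interval_vector_alt chord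
instance (chord : List Int) (out : List Int) : Decidable (Spec_interval_vector chord out) := by unfold Spec_interval_vector; infer_instance

-- ===== CLAIM (what is proved, stated in full; the proofs are below) =====
def Claim_equal_interval_vector : Prop := ∀ (chord : List Int), Dom_interval_vector chord → Spec_interval_vector chord (interval_vector chord)

-- ===== LEMMAS AND PROOFS =====

-- interval value of one combo pair after A's fix-up pass
def pvFix (t : Int) : Int := if t > 6 then 12 - t else t
def pvIC (a b : Int) : Int := pvFix (PySem.Int.mod |a - b| 12)

-- A's count of pairs of interval class k, over the unique-pc list u
def pvCountA (k : Int) (u : List Int) : Nat :=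
  (pvCombos2 u).countP (fun p => pvIC p.1 p.2 == k)

-- ordered-pair count: pairs (a, b) ∈ u × u with (b - a) % 12 = k
def pvOrd (k : Int) (u : List Int) : Nat :=
  (u.map (fun a => u.countP (fun b => (b - a) % 12 == k))).sum

theorem pvSumMapAdd {α : Type} (l : List α) (f g : α → Nat) :
    (l.map (fun a => f a + g a)).sum = (l.map f).sum + (l.map g).sum := by
  induction l with
  | nil => simp
  | cons x xs ih => simp [ih]; omega

theorem pvSumInd {α : Type} (l : List α) (p : α → Bool) :
    (l.map (fun a => if p a then 1 else 0)).sum = l.countP p := by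
  induction l with
  | nil => simp
  | cons x xs ih => simp [List.countP_cons, ih]; by_cases h : p x <;> simp [h] <;> omega

theorem pvCombos2_mem {u : List Int} {p : Int × Int} (hp : p ∈ pvCombos2 u) :
    p.1 ∈ u ∧ p.2 ∈ u := by
  induction u with
  | nil => simp [pvCombos2] at hp
  | cons x xs ih =>
    simp only [pvCombos2, List.mem_append, List.mem_map] at hp
    rcases hp with ⟨y, hy, rfl⟩ | h
    · exact ⟨List.mem_cons_self, List.mem_cons_of_mem _ hy⟩
    · rcases ih h with ⟨h1, h2⟩
      exact ⟨List.mem_cons_of_mem _ h1, List.mem_cons_of_mem _ h2⟩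

theorem pvCombos2_ne {u : List Int} (hnd : u.Nodup) {p : Int × Int}
    (hp : p ∈ pvCombos2 u) : p.1 ≠ p.2 := by
  induction u with
  | nil => simp [pvCombos2] at hp
  | cons x xs ih =>
    simp only [pvCombos2, List.mem_append, List.mem_map] at hp
    rcases List.nodup_cons.mp hnd with ⟨hx, hxs⟩
    rcases hp with ⟨y, hy, rfl⟩ | h
    · intro h
      simp only at h
      exact hx (by rw [h]; exact hy)
    · exact ih hxs h

-- the enumerate-and-set-in-place fix-up pass is a map of pvFix
theorem pvEnumFold (l pre : List Int) :
    (PySem.List.enumerate l (pre.length)).foldl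
      (fun acc p => if p.2 > 6 then PySem.List.pySetD acc p.1 (12 - p.2) else acc) (pre ++ l)
    = pre ++ l.map pvFix := by
  induction l generalizing pre with
  | nil => simp
  | cons x xs ih =>
    rw [PySem.List.enumerate_cons, List.foldl_cons]
    have hset : (pre ++ x :: xs).set pre.length (12 - x) = pre ++ (12 - x) :: xs := by
      induction pre with
      | nil => simp
      | cons a as ihp => simpa using ihp
    have key : ((if x > 6 then PySem.List.pySetD (pre ++ x :: xs) (↑pre.length) (12 - x)
          else pre ++ x :: xs)) = pre ++ pvFix x :: xs := by
      by_cases h : x > 6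
      · rw [if_pos h, PySem.List.pySetD_natCast, hset]
        simp [pvFix, h]
      · rw [if_neg h]
        simp [pvFix, h]
    rw [key]
    have : (↑pre.length + 1 : Int) = ↑(pre ++ [pvFix x]).length := by simp
    rw [this]
    have := ih (pre ++ [pvFix x])
    simpa using this

-- the presence table lookup is membership of the pitch class in chord's pcs
theorem pvPresentGet (l : List Int) (pr : List Bool) (h : pr.length = 12)
    (i : Int) (h0 : 0 ≤ i) (h12 : i < 12) :
    PySem.List.pyGetD
      (l.foldl (fun pr note => PySem.List.pySetD pr (PySem.Int.mod note 12) true) pr) i false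
    = (pr.getD i.toNat false || l.any (fun n => PySem.Int.mod n 12 == i)) := by
  induction l generalizing pr with
  | nil => simp [PySem.List.pyGetD_of_nonneg _ _ h0]
  | cons n ns ih =>
    rw [List.foldl_cons]
    have hm0 : 0 ≤ PySem.Int.mod n 12 := PySem.Int.mod_nonneg _ (by norm_num)
    have hm12 : PySem.Int.mod n 12 < 12 := PySem.Int.mod_lt _ (by norm_num)
    rw [PySem.List.pySetD_of_nonneg _ _ hm0]
    rw [ih _ (by simp [h])]
    have hkey : (pr.set (PySem.Int.mod n 12).toNat true).getD i.toNat false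
        = ((PySem.Int.mod n 12 == i) || pr.getD i.toNat false) := by
      by_cases hc : (PySem.Int.mod n 12).toNat = i.toNat
      · have hb : (PySem.Int.mod n 12 == i) = true := by
          simp only [beq_iff_eq]; omega
        rw [hb, Bool.true_or]
        rw [List.getD_eq_getElem?_getD, List.getElem?_set, if_pos hc, if_pos (by omega)]
        rfl
      · have hb : (PySem.Int.mod n 12 == i) = false := by
          simp only [beq_eq_false_iff_ne, ne_eq]; omega
        rw [hb, Bool.false_or]
        rw [List.getD_eq_getElem?_getD, List.getElem?_set_ne hc, ← List.getD_eq_getElem?_getD]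
    rw [hkey, List.any_cons]
    cases pr.getD i.toNat false <;> cases (PySem.Int.mod n 12 == i) <;> simp

-- pointwise: one unordered pair of distinct in-range pcs contributes to the ordered
-- count once for k < 6, twice for k = 6
theorem pvPoint (k x y : Int) (hk1 : 1 ≤ k) (hk6 : k ≤ 6)
    (hx0 : 0 ≤ x) (hx12 : x < 12) (hy0 : 0 ≤ y) (hy12 : y < 12) (hne : x ≠ y) :
    ((if (y - x) % 12 = k then 1 else 0) + (if (x - y) % 12 = k then 1 else 0) : Nat)
      = (if k = 6 then 2 else 1) * (if pvIC x y = k then 1 else 0) := by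
  have hmod : ∀ z : Int, PySem.Int.mod z 12 = z % 12 :=
    fun z => PySem.Int.mod_eq_emod_of_pos (by norm_num)
  rcases le_total x y with hle | hle
  · have habs : |x - y| = y - x := by rw [abs_of_nonpos (by omega)]; ring
    simp only [pvIC, pvFix, habs, hmod]
    split_ifs <;> omega
  · have habs : |x - y| = x - y := abs_of_nonneg (by omega)
    simp only [pvIC, pvFix, habs, hmod]
    split_ifs <;> omega

theorem pvCountPP {α : Type} (l : List α) (p q r : α → Bool) (c : Nat)
    (h : ∀ a ∈ l, ((if p a then 1 else 0) + (if q a then 1 else 0) : Nat)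
          = c * (if r a then 1 else 0)) :
    l.countP p + l.countP q = c * l.countP r := by
  induction l with
  | nil => simp
  | cons x xs ih =>
    have hx := h x List.mem_cons_self
    have ihh := ih (fun a ha => h a (List.mem_cons_of_mem _ ha))
    simp only [List.countP_cons]
    rw [Nat.mul_add]
    linarith

theorem pvOrdCons (k x : Int) (xs : List Int) :
    pvOrd k (x :: xs)
      = (if (x - x) % 12 = k then 1 else 0)
        + xs.countP (fun b => (b - x) % 12 == k)
        + xs.countP (fun a => (x - a) % 12 == k)
        + pvOrd k xs := by
  simp only [pvOrd, List.map_cons, List.sum_cons, List.countP_cons]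
  have : (xs.map (fun a => xs.countP (fun b => (b - a) % 12 == k)
            + (if ((x - a) % 12 == k) = true then 1 else 0))).sum
      = (xs.map (fun a => xs.countP (fun b => (b - a) % 12 == k))).sum
        + (xs.map (fun a => if ((x - a) % 12 == k) = true then 1 else 0)).sum :=
    pvSumMapAdd xs _ _
  rw [this, pvSumInd]
  simp only [beq_iff_eq]
  omega

-- core: the ordered count equals A's unordered count, doubled for the tritone
theorem pvCore (k : Int) (hk1 : 1 ≤ k) (hk6 : k ≤ 6) (u : List Int)
    (hnd : u.Nodup) (hr : ∀ a ∈ u, 0 ≤ a ∧ a < 12) :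
    pvOrd k u = (if k = 6 then 2 else 1) * pvCountA k u := by
  induction u with
  | nil => simp [pvOrd, pvCountA, pvCombos2]
  | cons x xs ih =>
    rcases List.nodup_cons.mp hnd with ⟨hx, hxs⟩
    have hxr := hr x List.mem_cons_self
    have hxsr : ∀ a ∈ xs, 0 ≤ a ∧ a < 12 := fun a ha => hr a (List.mem_cons_of_mem _ ha)
    have ihh := ih hxs hxsr
    rw [pvOrdCons]
    have h0 : (x - x) % 12 = 0 := by omega
    rw [if_neg (by omega)]
    have hA : pvCountA k (x :: xs)
        = xs.countP (fun y => pvIC x y == k) + pvCountA k xs := by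
      simp [pvCountA, pvCombos2, List.countP_append, List.countP_map, Function.comp_def]
    have hpair : xs.countP (fun b => (b - x) % 12 == k) + xs.countP (fun a => (x - a) % 12 == k)
        = (if k = 6 then 2 else 1) * xs.countP (fun y => pvIC x y == k) := by
      apply pvCountPP
      intro y hy
      have hyr := hxsr y hy
      have hne : x ≠ y := fun h => hx (h ▸ hy)
      have := pvPoint k x y hk1 hk6 hxr.1 hxr.2 hyr.1 hyr.2 hne
      simpa using this
    rw [hA, Nat.mul_add]
    linarith

-- the ordered count is computed by membership of (a + k) % 12
theorem pvOrdEq (k : Int) (hk1 : 1 ≤ k) (hk6 : k ≤ 6) (u : List Int)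
    (hnd : u.Nodup) (hr : ∀ a ∈ u, 0 ≤ a ∧ a < 12) :
    pvOrd k u = u.countP (fun a => decide ((a + k) % 12 ∈ u)) := by
  have hmap : ∀ a ∈ u, u.countP (fun b => (b - a) % 12 == k)
      = (if (decide ((a + k) % 12 ∈ u)) = true then 1 else 0) := by
    intro a ha
    have har := hr a ha
    have hcongr : u.countP (fun b => (b - a) % 12 == k)
        = u.countP (fun b => b == (a + k) % 12) := by
      apply List.countP_congr
      intro b hb
      have hbr := hr b hb
      simp only [beq_iff_eq]
      omega
    rw [hcongr, ← List.count_eq_countP]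
    by_cases hm : ((a + k) % 12) ∈ u
    · simp [hm, List.count_eq_one_of_mem hnd hm]
    · simp [hm, List.count_eq_zero_of_not_mem hm]
  unfold pvOrd
  rw [List.map_congr_left hmap]
  exact pvSumInd u (fun a => decide ((a + k) % 12 ∈ u))

-- counting over the full range with a membership guard = counting over the nodup subset
theorem pvCountSub (u L : List Int) (q : Int → Bool)
    (hndu : u.Nodup) (hndL : L.Nodup) (hsub : ∀ a ∈ u, a ∈ L) :
    L.countP (fun p => decide (p ∈ u) && q p) = u.countP q := by
  rw [List.countP_eq_length_filter, List.countP_eq_length_filter]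
  apply List.Perm.length_eq
  rw [List.perm_ext_iff_of_nodup (List.Nodup.filter _ hndL) (List.Nodup.filter _ hndu)]
  intro a
  simp only [List.mem_filter, Bool.and_eq_true, decide_eq_true_eq]
  constructor
  · rintro ⟨_, hu, hq⟩; exact ⟨hu, hq⟩
  · rintro ⟨hu, hq⟩; exact ⟨hsub a hu, ⟨hu, hq⟩⟩

-- the increment loop over a list of interval classes 1..6 counts each class
theorem pvIVFold (ts : List Int) (h : ∀ t ∈ ts, 1 ≤ t ∧ t ≤ 6) (a b c d e f : Int) :
    ts.foldl (fun iv interval =>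
      PySem.List.pySetD iv (interval - 1) (PySem.List.pyGetD iv (interval - 1) 0 + 1))
      [a, b, c, d, e, f]
    = [a + (ts.countP (fun t => t == 1) : Int), b + (ts.countP (fun t => t == 2) : Int),
       c + (ts.countP (fun t => t == 3) : Int), d + (ts.countP (fun t => t == 4) : Int),
       e + (ts.countP (fun t => t == 5) : Int), f + (ts.countP (fun t => t == 6) : Int)] := by
  induction ts generalizing a b c d e f with
  | nil => simp
  | cons t ts ih =>
    have ht := h t List.mem_cons_self
    have hts : ∀ t ∈ ts, 1 ≤ t ∧ t ≤ 6 := fun t htm => h t (List.mem_cons_of_mem _ htm)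
    rw [List.foldl_cons]
    have h01 : (0 ≤ t - 1) := by omega
    rw [PySem.List.pySetD_of_nonneg _ _ h01, PySem.List.pyGetD_of_nonneg _ _ h01]
    have hc : t = 1 ∨ t = 2 ∨ t = 3 ∨ t = 4 ∨ t = 5 ∨ t = 6 := by omega
    rcases hc with rfl | rfl | rfl | rfl | rfl | rfl <;>
      · simp only [show ((1:Int) - 1).toNat = 0 from rfl, show ((2:Int) - 1).toNat = 1 from rfl,
          show ((3:Int) - 1).toNat = 2 from rfl, show ((4:Int) - 1).toNat = 3 from rfl,
          show ((5:Int) - 1).toNat = 4 from rfl, show ((6:Int) - 1).toNat = 5 from rfl,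
          List.getD, List.set]
        rw [ih hts]
        simp [List.countP_cons]
        omega

theorem pvICBounds (a b : Int) (ha0 : 0 ≤ a) (ha12 : a < 12) (hb0 : 0 ≤ b) (hb12 : b < 12)
    (hne : a ≠ b) : 1 ≤ pvIC a b ∧ pvIC a b ≤ 6 := by
  have hmod : ∀ z : Int, PySem.Int.mod z 12 = z % 12 :=
    fun z => PySem.Int.mod_eq_emod_of_pos (by norm_num)
  rcases le_total a b with hle | hle
  · have habs : |a - b| = b - a := by rw [abs_of_nonpos (by omega)]; ring
    simp only [pvIC, pvFix, habs, hmod]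
    split_ifs <;> omega
  · have habs : |a - b| = a - b := abs_of_nonneg (by omega)
    simp only [pvIC, pvFix, habs, hmod]
    split_ifs <;> omega

theorem pvMain (chord : List Int) : interval_vector chord = interval_vector_alt chord := by
  have hmod12 : ∀ z : Int, PySem.Int.mod z 12 = z % 12 :=
    fun z => PySem.Int.mod_eq_emod_of_pos (by norm_num)
  set pcs : List Int := chord.map (fun note => PySem.Int.mod note 12) with hpcs
  set u : List Int := PySem.Set.ofList pcs with hu
  have hnd : u.Nodup := PySem.Set.nodup_ofList pcs
  have hmemu : ∀ x : Int, x ∈ u ↔ x ∈ pcs := fun x => PySem.Set.mem_ofList pcs x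
  have hrpcs : ∀ a ∈ pcs, 0 ≤ a ∧ a < 12 := by
    intro a ha
    rcases List.mem_map.mp ha with ⟨n, _, rfl⟩
    exact ⟨PySem.Int.mod_nonneg _ (by norm_num), PySem.Int.mod_lt _ (by norm_num)⟩
  have hr : ∀ a ∈ u, 0 ≤ a ∧ a < 12 := fun a ha => hrpcs a ((hmemu a).mp ha)
  -- ---------- A side ----------
  set ts : List Int := (pvCombos2 u).map (fun p => pvIC p.1 p.2) with hts_def
  have hts : ∀ t ∈ ts, 1 ≤ t ∧ t ≤ 6 := by
    intro t ht
    rcases List.mem_map.mp ht with ⟨p, hp, rfl⟩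
    rcases pvCombos2_mem hp with ⟨h1, h2⟩
    rcases hr _ h1 with ⟨h10, h112⟩
    rcases hr _ h2 with ⟨h20, h212⟩
    exact pvICBounds _ _ h10 h112 h20 h212 (pvCombos2_ne hnd hp)
  have hcnt : ∀ k : Int, ts.countP (fun t => t == k) = pvCountA k u := by
    intro k
    simp [hts_def, pvCountA, List.countP_map, Function.comp_def, pvIC]
  have hA : interval_vector chord
      = [(pvCountA 1 u : Int), (pvCountA 2 u : Int), (pvCountA 3 u : Int),
         (pvCountA 4 u : Int), (pvCountA 5 u : Int), (pvCountA 6 u : Int)] := by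
    unfold interval_vector
    rw [← hpcs, ← hu]
    have henum : (PySem.List.enumerate ((pvCombos2 u).map
          (fun pitch => PySem.Int.mod |pitch.1 - pitch.2| 12)) 0).foldl
        (fun acc p => if p.2 > 6 then PySem.List.pySetD acc p.1 (12 - p.2) else acc)
        ((pvCombos2 u).map (fun pitch => PySem.Int.mod |pitch.1 - pitch.2| 12))
        = ts := by
      have := pvEnumFold ((pvCombos2 u).map (fun pitch => PySem.Int.mod |pitch.1 - pitch.2| 12)) []
      simpa [hts_def, List.map_map, Function.comp_def, pvIC] using this
    simp only []
    rw [henum]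
    have hzeros : (List.range 6).map (fun _ => (0 : Int)) = [0, 0, 0, 0, 0, 0] := by rfl
    rw [hzeros, pvIVFold ts hts 0 0 0 0 0 0]
    simp [hcnt]
  -- ---------- B side ----------
  set present : List Bool := chord.foldl
      (fun pr note => PySem.List.pySetD pr (PySem.Int.mod note 12) true)
      (List.replicate 12 false) with hpresent_def
  have hpres : ∀ i : Int, 0 ≤ i → i < 12 →
      PySem.List.pyGetD present i false = decide (i ∈ u) := by
    intro i h0 h12
    rw [hpresent_def, pvPresentGet chord _ (by simp) i h0 h12]
    have : (List.replicate 12 false).getD i.toNat false = false := by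
      simp only [List.getD_eq_getElem?_getD, List.getElem?_replicate]
      split <;> rfl
    rw [this, Bool.false_or]
    have : (chord.any fun n => PySem.Int.mod n 12 == i) = decide (i ∈ pcs) := by
      by_cases h : i ∈ pcs
      · rcases List.mem_map.mp (hpcs ▸ h) with ⟨n, hn, he⟩
        simp only [h, decide_true]
        exact List.any_eq_true.mpr ⟨n, hn, by simpa using he⟩
      · simp only [h, decide_false]
        rw [List.any_eq_false]
        intro n hn
        simp only [beq_iff_eq]
        intro he
        exact h (hpcs ▸ List.mem_map.mpr ⟨n, hn, he⟩)
    rw [this]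
    exact decide_eq_decide.mpr (hmemu i).symm
  have hL12 : ∀ ic : Int,
      ((PySem.List.pyRange 0 12 1).filter (fun pc =>
          PySem.List.pyGetD present pc false
            && PySem.List.pyGetD present (PySem.Int.mod (pc + ic) 12) false)).length
        = u.countP (fun a => decide ((a + ic) % 12 ∈ u)) := by
    intro ic
    rw [← List.countP_eq_length_filter]
    have hcg : (PySem.List.pyRange 0 12 1).countP (fun pc =>
          PySem.List.pyGetD present pc false
            && PySem.List.pyGetD present (PySem.Int.mod (pc + ic) 12) false)
        = (PySem.List.pyRange 0 12 1).countP (fun pc =>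
            decide (pc ∈ u) && decide ((pc + ic) % 12 ∈ u)) := by
      apply List.countP_congr
      intro pc hpc
      rcases (PySem.List.mem_pyRange_one).mp hpc with ⟨hpc0, hpc12⟩
      have hm0 : 0 ≤ (pc + ic) % 12 := Int.emod_nonneg _ (by norm_num)
      have hm12 : (pc + ic) % 12 < 12 := Int.emod_lt_of_pos _ (by norm_num)
      rw [hpres pc hpc0 hpc12, hmod12, hpres _ hm0 hm12]
    rw [hcg]
    exact pvCountSub u _ _ hnd (PySem.List.nodup_pyRange_one 0 12)
      (fun a ha => (PySem.List.mem_pyRange_one).mpr ⟨(hr a ha).1, (hr a ha).2⟩)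
  have hucount : ∀ ic : Int, 1 ≤ ic → ic ≤ 6 →
      u.countP (fun a => decide ((a + ic) % 12 ∈ u))
        = (if ic = 6 then 2 else 1) * pvCountA ic u := by
    intro ic h1 h6
    rw [← pvOrdEq ic h1 h6 u hnd hr, pvCore ic h1 h6 u hnd hr]
  have harith : PySem.Int.floordiv ((2 * pvCountA 6 u : Nat) : Int) 2 = (pvCountA 6 u : Int) := by
    rw [PySem.Int.floordiv_eq_ediv_of_pos (by norm_num)]
    push_cast
    omega
  have hB : interval_vector_alt chord
      = [(pvCountA 1 u : Int), (pvCountA 2 u : Int), (pvCountA 3 u : Int),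
         (pvCountA 4 u : Int), (pvCountA 5 u : Int), (pvCountA 6 u : Int)] := by
    unfold interval_vector_alt
    rw [← hpresent_def]
    simp only []
    rw [show PySem.List.pyRange 1 7 1 = [1, 2, 3, 4, 5, 6] from rfl]
    simp only [List.map_cons, List.map_nil]
    rw [hL12 1, hL12 2, hL12 3, hL12 4, hL12 5, hL12 6,
        hucount 1 (by norm_num) (by norm_num), hucount 2 (by norm_num) (by norm_num),
        hucount 3 (by norm_num) (by norm_num), hucount 4 (by norm_num) (by norm_num),
        hucount 5 (by norm_num) (by norm_num), hucount 6 (by norm_num) (by norm_num)]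
    simp only [show ((if (1:Int) = 6 then 2 else 1) : Nat) = 1 from by norm_num,
      show ((if (2:Int) = 6 then 2 else 1) : Nat) = 1 from by norm_num,
      show ((if (3:Int) = 6 then 2 else 1) : Nat) = 1 from by norm_num,
      show ((if (4:Int) = 6 then 2 else 1) : Nat) = 1 from by norm_num,
      show ((if (5:Int) = 6 then 2 else 1) : Nat) = 1 from by norm_num,
      show ((if (6:Int) = 6 then 2 else 1) : Nat) = 2 from by norm_num,
      if_true, Nat.one_mul]
    rw [PySem.List.pySetD_of_nonneg _ _ (by norm_num : (0:Int) ≤ 5),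
        PySem.List.pyGetD_of_nonneg _ _ (by norm_num : (0:Int) ≤ 5)]
    rw [show ∀ a b c d e f : Int,
          ([a, b, c, d, e, f].set (5:Int).toNat
            (PySem.Int.floordiv ([a, b, c, d, e, f].getD (5:Int).toNat 0) 2))
          = [a, b, c, d, e, PySem.Int.floordiv f 2] from fun _ _ _ _ _ _ => rfl]
    rw [harith]
  rw [hA, hB]

-- ===== VERDICT (by name: the statement is the Claim_ definition above) =====
theorem interval_vector_spec : Claim_equal_interval_vector := by
  intro chord _
  unfold Spec_interval_vector
  exact pvMain chord
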